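-- pv_equiv track=rewrite | github.com/RishabhSinha07/EpicToSprintPlanner | src/common/scalable_story_merger.py | _build_merge_groups
-- ===== SOURCE A (Python) =====
-- from typing import List, Dict, Tuple, Set
--
-- def _build_merge_groups(
--
--     pairs: List[Tuple[int, int]],
--     total_stories: int
-- ) -> List[List[int]]:
--     """
--     Build merge groups handling transitive duplicates.
--
--     Example: If (1,2) and (2,3) are duplicates, merge all three: [1,2,3]
--
--     Returns:
--         List of groups, where each group is a list of story indices
--     """
--     # Union-find to group transitively connected stories
--     parent = list(range(total_stories))
--
--     def find(x):
--         if parent[x] != x: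
--             parent[x] = find(parent[x])
--         return parent[x]
--
--     def union(x, y):
--         px, py = find(x), find(y)
--         if px != py:
--             parent[px] = py
--
--     # Union all pairs
--     for idx1, idx2 in pairs:
--         union(idx1, idx2)
--
--     # Group by parent
--     groups_dict = {}
--     for i in range(total_stories):
--         root = find(i)
--         if root not in groups_dict:
--             groups_dict[root] = []
--         groups_dict[root].append(i)
--
--     return list(groups_dict.values())
-- ===== SOURCE B (Python) =====
-- from typing import List, Tuple
--
-- def _build_merge_groups(
--     pairs: List[Tuple[int, int]],
--     total_stories: int
-- ) -> List[List[int]]: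
--     """Group transitively connected story indices by iterative component relabeling."""
--     # comp[i] is the label of i's component; merging a pair repaints one whole label.
--     comp = list(range(total_stories))
--     for idx1, idx2 in pairs:
--         old, new = comp[idx1], comp[idx2]
--         if old != new:
--             comp = [new if c == old else c for c in comp]
--
--     groups = {}
--     for i in range(total_stories):
--         groups.setdefault(comp[i], []).append(i)
--     return list(groups.values())
-- ===== Notes on version B (the rewrite author's own statement) =====
-- stated objective: alternative
-- what changed: Replaces A's recursive union-find (path-compressed find + union on a parent forest, then grouping by find(i)) with an iterative component-labeling array: each pair repaints every occurrence of one label with the other, so grouping reads labels directly with no recursion, no parent forest and no find calls.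
import Mathlib
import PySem

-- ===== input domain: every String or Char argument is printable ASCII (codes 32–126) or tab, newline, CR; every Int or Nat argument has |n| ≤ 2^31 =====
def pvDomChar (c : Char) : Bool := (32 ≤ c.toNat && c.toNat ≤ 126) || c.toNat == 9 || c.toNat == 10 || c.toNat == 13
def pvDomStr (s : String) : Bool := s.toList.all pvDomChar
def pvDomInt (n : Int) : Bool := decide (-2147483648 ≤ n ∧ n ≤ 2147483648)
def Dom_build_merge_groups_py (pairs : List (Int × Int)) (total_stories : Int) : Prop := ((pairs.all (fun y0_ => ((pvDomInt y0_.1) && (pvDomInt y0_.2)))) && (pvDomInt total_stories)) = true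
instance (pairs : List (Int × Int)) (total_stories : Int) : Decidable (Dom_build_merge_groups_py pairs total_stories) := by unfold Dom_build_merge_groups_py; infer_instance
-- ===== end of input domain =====

-- B replaces A's recursive union-find (path compression + dict of roots) by iterative whole-array
-- component relabeling over the same pairs; equal output is proved on all inputs where A returns.

-- ===== PORT A =====
-- find(x): if parent[x] != x: parent[x] = find(parent[x]); return parent[x]
-- (fuel makes the recursion structural; parent.length + 1 fuel is always enough on Pre_ inputs)
def pvFindA : Nat → List Int → Int → List Int × Int
  | 0, p, x => (p, PySem.List.pyGetD p x 0)
  | fuel + 1, p, x =>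
      let px := PySem.List.pyGetD p x 0
      if px ≠ x then
        let r := pvFindA fuel p px
        let p2 := PySem.List.pySetD r.1 x r.2
        (p2, PySem.List.pyGetD p2 x 0)
      else (p, px)

-- union(x, y): px, py = find(x), find(y); if px != py: parent[px] = py
def pvUnionA (p : List Int) (x y : Int) : List Int :=
  let f1 := pvFindA (p.length + 1) p x
  let f2 := pvFindA (f1.1.length + 1) f1.1 y
  if f1.2 ≠ f2.2 then PySem.List.pySetD f2.1 f1.2 f2.2 else f2.1

def build_merge_groups_py (pairs : List (Int × Int)) (total_stories : Int) : List (List Int) :=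
  -- parent = list(range(total_stories)); for idx1, idx2 in pairs: union(idx1, idx2)
  let parent := pairs.foldl (fun p pr => pvUnionA p pr.1 pr.2) (PySem.List.pyRange 0 total_stories 1)
  -- for i in range(total_stories): root = find(i); groups_dict.setdefault-style insert; append
  let st := (PySem.List.pyRange 0 total_stories 1).foldl
    (fun (s : List Int × PySem.Dict Int (List Int)) i =>
      let f := pvFindA (s.1.length + 1) s.1 i
      let d1 := if s.2.contains f.2 then s.2 else s.2.insert f.2 []
      (f.1, d1.modify f.2 [] (· ++ [i])))
    (parent, PySem.Dict.empty)
  st.2.values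

-- ===== PORT B =====
def build_merge_groups_py_alt (pairs : List (Int × Int)) (total_stories : Int) : List (List Int) :=
  -- comp = list(range(total_stories)); for idx1, idx2 in pairs: repaint label old -> new
  let comp := pairs.foldl (fun c pr =>
      let old := PySem.List.pyGetD c pr.1 0
      let nw := PySem.List.pyGetD c pr.2 0
      if old ≠ nw then c.map (fun v => if v = old then nw else v) else c)
    (PySem.List.pyRange 0 total_stories 1)
  -- for i in range(total_stories): groups.setdefault(comp[i], []).append(i)
  let d := (PySem.List.pyRange 0 total_stories 1).foldl
    (fun (d : PySem.Dict Int (List Int)) i =>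
      (d.setdefault (PySem.List.pyGetD comp i 0) []).modify (PySem.List.pyGetD comp i 0) [] (· ++ [i]))
    PySem.Dict.empty
  d.values

-- ===== PRECONDITION & SPEC =====
-- Pre_: every pair index is a valid Python index into the parent list (|idx| within range);
-- outside this A raises IndexError. A is total otherwise (negative in-range indices wrap and are kept).
def Pre_build_merge_groups_py (pairs : List (Int × Int)) (total_stories : Int) : Prop :=
  ∀ pr ∈ pairs, -total_stories ≤ pr.1 ∧ pr.1 < total_stories ∧ -total_stories ≤ pr.2 ∧ pr.2 < total_stories
instance (pairs : List (Int × Int)) (total_stories : Int) : Decidable (Pre_build_merge_groups_py pairs total_stories) := by unfold Pre_build_merge_groups_py; infer_instance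

def pvWitness_build_merge_groups_py : (List (Int × Int)) × Int := ([(0, 1), (2, 1), (-4, 3)], 5)

def Spec_build_merge_groups_py (pairs : List (Int × Int)) (total_stories : Int) (out : List (List Int)) : Prop := out = build_merge_groups_py_alt pairs total_stories
instance (pairs : List (Int × Int)) (total_stories : Int) (out : List (List Int)) : Decidable (Spec_build_merge_groups_py pairs total_stories out) := by unfold Spec_build_merge_groups_py; infer_instance

-- ===== CLAIM (what is proved, stated in full; the proofs are below) =====
def Claim_equal_build_merge_groups_py : Prop := ∀ (pairs : List (Int × Int)) (total_stories : Int), Dom_build_merge_groups_py pairs total_stories → Pre_build_merge_groups_py pairs total_stories → Spec_build_merge_groups_py pairs total_stories (build_merge_groups_py pairs total_stories)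

-- ===== LEMMAS AND PROOFS =====

-- normalised (Python wraparound) index, matching PySem.List.pyIdx? on in-range inputs
def pvNorm (n : Nat) (i : Int) : Nat := if 0 ≤ i then i.toNat else n - (-i).toNat

lemma pyGetD_norm (xs : List Int) (i : Int) (d : Int) (h1 : -(xs.length : Int) ≤ i) (h2 : i < (xs.length : Int)) :
    PySem.List.pyGetD xs i d = xs.getD (pvNorm xs.length i) d := by
  simp only [PySem.List.pyGetD, PySem.List.pyGet?, PySem.List.pyIdx?, pvNorm]
  split
  · simp [List.getD]
  · simp [List.getD]

lemma pySetD_norm (xs : List Int) (i : Int) (v : Int) (h1 : -(xs.length : Int) ≤ i) (h2 : i < (xs.length : Int)) :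
    PySem.List.pySetD xs i v = xs.set (pvNorm xs.length i) v := by
  simp only [PySem.List.pySetD, PySem.List.pySet?, PySem.List.pyIdx?, pvNorm]
  split
  · simp
  · simp

lemma pvNorm_lt (n : Nat) (i : Int) (_h1 : -(n : Int) ≤ i) (h2 : i < (n : Int)) (hn : 0 < n) :
    pvNorm n i < n := by
  unfold pvNorm; split <;> omega

lemma getD_set (p : List Int) (i : Nat) (v : Int) (k : Nat) :
    (p.set i v).getD k 0 = if k = i ∧ i < p.length then v else p.getD k 0 := by
  rw [List.getD_eq_getElem?_getD, List.getElem?_set]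
  by_cases hk : k = i
  · by_cases hl : i < p.length
    · rw [if_pos hk.symm, if_pos hl, if_pos ⟨hk, hl⟩]; rfl
    · rw [if_pos hk.symm, if_neg hl, if_neg (fun h => hl h.2)]
      rw [List.getD_eq_getElem?_getD, List.getElem?_eq_none (by omega)]
  · rw [if_neg (fun h => hk h.symm), if_neg (fun h => hk h.1), List.getD_eq_getElem?_getD]

-- one parent-chasing step, as a Nat index
def stepN (p : List Int) (j : Nat) : Nat := (p.getD j 0).toNat

lemma stepN_set (p : List Int) (i : Nat) (v : Nat) (hi : i < p.length) (k : Nat) :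
    stepN (p.set i (v : Int)) k = if k = i then v else stepN p k := by
  unfold stepN; rw [getD_set]
  by_cases hk : k = i
  · simp [hk, hi]
  · simp [hk]

-- the parent chain from j down to its root (Nodup by construction)
inductive ChainN (p : List Int) : Nat → List Nat → Prop
  | fix (j : Nat) : stepN p j = j → ChainN p j [j]
  | step (j : Nat) (l : List Nat) : stepN p j ≠ j → ChainN p (stepN p j) l → j ∉ l → ChainN p j (j :: l)

def rootC (l : List Nat) : Nat := (l.getLast?).getD 0

def GoodP (p : List Int) : Prop := ∀ j, j < p.length → 0 ≤ p.getD j 0 ∧ p.getD j 0 < (p.length : Int)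

def WfP (p : List Int) : Prop := ∀ j, j < p.length → ∃ l, ChainN p j l

-- the simulation relation between A's parent array and B's label array
def RelPC (p c : List Int) : Prop :=
  p.length = c.length ∧ GoodP p ∧ WfP p ∧
  ∀ j, j < p.length → ∀ l, ChainN p j l → c.getD j 0 = (rootC l : Int)

lemma chain_ne_nil {p : List Int} {j : Nat} {l : List Nat} (h : ChainN p j l) : l ≠ [] := by
  cases h <;> simp

lemma rootC_cons {x : Nat} {l : List Nat} (h : l ≠ []) : rootC (x :: l) = rootC l := by
  unfold rootC
  cases l with
  | nil => exact absurd rfl h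
  | cons a t => rw [List.getLast?_cons_cons]

lemma chain_unique {p : List Int} {j : Nat} {l l' : List Nat}
    (h : ChainN p j l) (h' : ChainN p j l') : l = l' := by
  induction h generalizing l' with
  | fix j hf =>
    cases h' with
    | fix _ => rfl
    | step _ _ hs _ _ => exact absurd hf hs
  | step j l2 hs hc hn ih =>
    cases h' with
    | fix _ hf => exact absurd hf hs
    | step _ _ _ hc' _ => rw [ih hc']

lemma chain_last_fix {p : List Int} {j : Nat} {l : List Nat} (h : ChainN p j l) :
    stepN p (rootC l) = rootC l := by
  induction h with
  | fix j hf => simpa [rootC] using hf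
  | step j l2 hs hc hn ih => rwa [rootC_cons (chain_ne_nil hc)]

lemma chain_suffix_root {p : List Int} {j : Nat} {l : List Nat} (h : ChainN p j l) :
    ∀ z ∈ l, ∃ lz, ChainN p z lz ∧ rootC lz = rootC l := by
  induction h with
  | fix j hf =>
    intro z hz
    have hzj : z = j := by simpa using hz
    subst hzj
    exact ⟨[z], ChainN.fix z hf, rfl⟩
  | step j l2 hs hc hn ih =>
    intro z hz
    rcases List.mem_cons.1 hz with rfl | hz
    · exact ⟨z :: l2, ChainN.step z l2 hs hc hn, rfl⟩
    · rcases ih z hz with ⟨lz, hlz, hr⟩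
      exact ⟨lz, hlz, by rw [hr, rootC_cons (chain_ne_nil hc)]⟩

lemma chain_root_mem {p : List Int} {j : Nat} {l : List Nat} (h : ChainN p j l) : rootC l ∈ l := by
  induction h with
  | fix j hf => simp [rootC]
  | step j l2 hs hc hn ih => rw [rootC_cons (chain_ne_nil hc)]; exact List.mem_cons_of_mem _ ih

lemma chain_nodup {p : List Int} {j : Nat} {l : List Nat} (h : ChainN p j l) : l.Nodup := by
  induction h with
  | fix j hf => simp
  | step j l2 hs hc hn ih => exact List.nodup_cons.2 ⟨hn, ih⟩

lemma chain_mem_lt {p : List Int} {j : Nat} {l : List Nat} (hG : GoodP p)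
    (h : ChainN p j l) (hj : j < p.length) : ∀ z ∈ l, z < p.length := by
  induction h with
  | fix j hf =>
    intro z hz
    have hzj : z = j := by simpa using hz
    omega
  | step j l2 hs hc hn ih =>
    intro z hz
    have hstep : stepN p j < p.length := by
      have := hG j hj; unfold stepN; omega
    rcases List.mem_cons.1 hz with rfl | hz
    · exact hj
    · exact ih hstep z hz

lemma chain_len_le {p : List Int} {j : Nat} {l : List Nat} (hG : GoodP p)
    (h : ChainN p j l) (hj : j < p.length) : l.length ≤ p.length := by
  have hnd := chain_nodup h
  have hlt := chain_mem_lt hG h hj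
  have hsub : l.toFinset ⊆ Finset.range p.length := by
    intro z hz; simp at hz ⊢; exact hlt z hz
  have := Finset.card_le_card hsub
  simpa [List.toFinset_card_of_nodup hnd] using this

lemma rootC_lt {p : List Int} {j : Nat} {l : List Nat} (hG : GoodP p)
    (h : ChainN p j l) (hj : j < p.length) : rootC l < p.length :=
  chain_mem_lt hG h hj _ (chain_root_mem h)

-- chains survive repainting a set of nodes onto their common root (path compression)
lemma paint_chain {p p' : List Int} {S : List Nat} {r : Nat}
    (hpt : ∀ k, p'.getD k 0 = if k ∈ S then (r : Int) else p.getD k 0)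
    (hS : ∀ z ∈ S, ∀ lz, ChainN p z lz → rootC lz = r)
    (hr : stepN p r = r) :
    ∀ j l, ChainN p j l → ∃ l', ChainN p' j l' ∧ rootC l' = rootC l ∧ ∀ z ∈ l', z ∈ l ∨ z = r := by
  have hstep : ∀ k, stepN p' k = if k ∈ S then r else stepN p k := by
    intro k; unfold stepN; rw [hpt k]; split <;> simp
  have hr' : stepN p' r = r := by rw [hstep]; split <;> [rfl; exact hr]
  intro j l h
  induction h with
  | fix j hf =>
    by_cases hjS : j ∈ S
    · have hjr : j = r := by
        have := hS j hjS [j] (ChainN.fix j hf); simpa [rootC] using this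
      subst hjr
      exact ⟨[j], ChainN.fix j hr', rfl, by simp⟩
    · exact ⟨[j], ChainN.fix j (by rw [hstep]; simp [hjS, hf]), rfl, by simp⟩
  | step j l2 hs hc hn ih =>
    by_cases hjS : j ∈ S
    · have hroot : rootC (j :: l2) = r := hS j hjS _ (ChainN.step j l2 hs hc hn)
      have hrne : r ≠ j := by
        intro hrj
        have hmem : rootC (j :: l2) ∈ l2 := by
          rw [rootC_cons (chain_ne_nil hc)]
          exact chain_root_mem hc
        rw [hroot, hrj] at hmem; exact hn hmem
      refine ⟨[j, r], ?_, ?_, ?_⟩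
      · refine ChainN.step j [r] ?_ ?_ ?_
        · rw [hstep, if_pos hjS]; omega
        · rw [hstep, if_pos hjS]; exact ChainN.fix r hr'
        · simp; omega
      · rw [hroot]; simp [rootC]
      · intro z hz; simp at hz; rcases hz with rfl | rfl
        · exact Or.inl (by simp)
        · exact Or.inr rfl
    · rcases ih with ⟨l2', hc', hroot', hsub'⟩
      have hstj : stepN p' j = stepN p j := by rw [hstep, if_neg hjS]
      have hjnotin : j ∉ l2' := by
        intro hjin
        rcases hsub' j hjin with hj2 | hjr
        · exact hn hj2
        · subst hjr; exact hs hr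
      refine ⟨j :: l2', ChainN.step j l2' (by rw [hstj]; exact hs) (by rw [hstj]; exact hc') hjnotin, ?_, ?_⟩
      · rw [rootC_cons (chain_ne_nil hc'), rootC_cons (chain_ne_nil hc), hroot']
      · intro z hz
        rcases List.mem_cons.1 hz with rfl | hz
        · exact Or.inl (by simp)
        · rcases hsub' z hz with h1 | h1
          · exact Or.inl (List.mem_cons_of_mem _ h1)
          · exact Or.inr h1

-- chains survive linking root px under root py (the union write)
lemma link_chain {p : List Int} {px py : Nat} (hpxlt : px < p.length)
    (hpx : stepN p px = px) (hpyfix : stepN p py = py) (hne : px ≠ py) :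
    ∀ j l, ChainN p j l → ∃ l', ChainN (p.set px (py : Int)) j l' ∧
      rootC l' = (if rootC l = px then py else rootC l) ∧ ∀ z ∈ l', z ∈ l ∨ z = py := by
  have hstep : ∀ k, stepN (p.set px (py : Int)) k = if k = px then py else stepN p k :=
    stepN_set p px py hpxlt
  have hpy' : stepN (p.set px (py : Int)) py = py := by
    rw [hstep, if_neg (fun h => hne h.symm)]; exact hpyfix
  intro j l h
  induction h with
  | fix j hf =>
    by_cases hj : j = px
    · subst hj
      refine ⟨[j, py], ?_, ?_, ?_⟩
      · refine ChainN.step j [py] ?_ ?_ ?_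
        · rw [hstep, if_pos rfl]; omega
        · rw [hstep, if_pos rfl]; exact ChainN.fix py hpy'
        · simp; omega
      · simp [rootC]
      · intro z hz; simp at hz; rcases hz with rfl | rfl
        · exact Or.inl (by simp)
        · exact Or.inr rfl
    · refine ⟨[j], ChainN.fix j (by rw [hstep, if_neg hj]; exact hf), ?_, by simp⟩
      simp [rootC, hj]
  | step j l2 hs hc hn ih =>
    have hj : j ≠ px := by
      intro h; rw [h] at hs; exact hs hpx
    rcases ih with ⟨l2', hc', hroot', hsub'⟩
    have hstj : stepN (p.set px (py : Int)) j = stepN p j := by rw [hstep, if_neg hj]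
    have hjnotin : j ∉ l2' := by
      intro hjin
      rcases hsub' j hjin with h1 | h1
      · exact hn h1
      · subst h1; exact hs hpyfix
    refine ⟨j :: l2', ChainN.step j l2' (by rw [hstj]; exact hs) (by rw [hstj]; exact hc') hjnotin, ?_, ?_⟩
    · rw [rootC_cons (chain_ne_nil hc'), rootC_cons (chain_ne_nil hc), hroot']
    · intro z hz
      rcases List.mem_cons.1 hz with rfl | hz
      · exact Or.inl (by simp)
      · rcases hsub' z hz with h1 | h1
        · exact Or.inl (List.mem_cons_of_mem _ h1)
        · exact Or.inr h1

-- find, on a nonnegative in-range index: returns the chain root, repaints the chain body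
lemma findA_spec_nonneg {p : List Int} {j : Nat} {l : List Nat}
    (hG : GoodP p) (hj : j < p.length) (hc : ChainN p j l) :
    ∀ fuel, l.length ≤ fuel →
    ∃ p', pvFindA fuel p (j : Int) = (p', ((rootC l : Nat) : Int)) ∧ p'.length = p.length ∧
      ∀ k, p'.getD k 0 = if k ∈ l.dropLast then ((rootC l : Nat) : Int) else p.getD k 0 := by
  induction hc with
  | fix j hf =>
    intro fuel hfuel
    cases fuel with
    | zero => simp at hfuel
    | succ f =>
      have h0 := hG j hj
      have hstepj : (p.getD j 0).toNat = j := hf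
      have hget : PySem.List.pyGetD p (j : Int) 0 = (j : Int) := by
        rw [PySem.List.pyGetD_natCast]; omega
      refine ⟨p, ?_, rfl, by simp⟩
      simp [pvFindA, hget, rootC]
  | step j l2 hs hc hn ih =>
    intro fuel hfuel
    cases fuel with
    | zero => simp at hfuel
    | succ f =>
      have h0 := hG j hj
      have hget : PySem.List.pyGetD p (j : Int) 0 = ((stepN p j : Nat) : Int) := by
        rw [PySem.List.pyGetD_natCast]; unfold stepN; omega
      have hylt : stepN p j < p.length := by unfold stepN; omega
      have hne : ((stepN p j : Nat) : Int) ≠ (j : Int) := by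
        intro h; exact hs (by exact_mod_cast h)
      rcases ih hylt f (by simp at hfuel; omega) with ⟨p1, hrec, hlen1, hpt1⟩
      have hl2 : l2 ≠ [] := chain_ne_nil hc
      have hrc : rootC (j :: l2) = rootC l2 := rootC_cons hl2
      refine ⟨p1.set j ((rootC l2 : Nat) : Int), ?_, by simp [hlen1], ?_⟩
      · show pvFindA (f + 1) p (j : Int) = _
        simp only [pvFindA, hget]
        rw [if_pos hne, hrec]
        have hset : PySem.List.pySetD p1 (j : Int) ((rootC l2 : Nat) : Int) = p1.set j ((rootC l2 : Nat) : Int) := by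
          rw [PySem.List.pySetD_natCast]
        simp only [hset]
        have hread : PySem.List.pyGetD (p1.set j ((rootC l2 : Nat) : Int)) (j : Int) 0 = ((rootC l2 : Nat) : Int) := by
          rw [PySem.List.pyGetD_natCast, getD_set, if_pos ⟨rfl, by omega⟩]
        rw [hread, hrc]
      · intro k
        have hdl : (j :: l2).dropLast = j :: l2.dropLast := by
          cases l2 with
          | nil => exact absurd rfl hl2
          | cons a t => rfl
        rw [hdl, hrc, getD_set]
        by_cases hk : k = j
        · simp [hk, hlen1, hj]
        · rw [if_neg (by simp [hk]), hpt1 k]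
          simp [hk]

-- find on any in-range Python index (wraparound included)
lemma findA_spec (p : List Int) (x : Int) (h1 : -(p.length : Int) ≤ x) (h2 : x < (p.length : Int))
    (hG : GoodP p) {l : List Nat} (hc : ChainN p (pvNorm p.length x) l) :
    ∃ p', pvFindA (p.length + 1) p x = (p', ((rootC l : Nat) : Int)) ∧ p'.length = p.length ∧
      ∀ k, p'.getD k 0 = if k ∈ l.dropLast then ((rootC l : Nat) : Int) else p.getD k 0 := by
  have hn : 0 < p.length := by omega
  have hjlt : pvNorm p.length x < p.length := pvNorm_lt _ _ h1 h2 hn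
  by_cases hx : 0 ≤ x
  · have hxj : x = ((pvNorm p.length x : Nat) : Int) := by unfold pvNorm; rw [if_pos hx]; omega
    rw [hxj]
    exact findA_spec_nonneg hG hjlt hc (p.length + 1) (by have := chain_len_le hG hc hjlt; omega)
  · -- negative in-range index: parent[x] != x always holds; one wrapped read, then the nonneg case
    set j := pvNorm p.length x with hjdef
    have h0 := hG j hjlt
    have hget : PySem.List.pyGetD p x 0 = p.getD j 0 := pyGetD_norm p x 0 h1 h2
    have hpxne : p.getD j 0 ≠ x := by omega
    cases hc with
    | fix =>
      rename_i hf
      have hstepj : (p.getD j 0).toNat = j := hf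
      have hyj : p.getD j 0 = ((j : Nat) : Int) := by omega
      rcases findA_spec_nonneg hG hjlt (ChainN.fix j hf) p.length (by simp; omega) with ⟨p1, hrec, hlen1, hpt1⟩
      have hp1 : p1 = p := by
        apply List.ext_getElem (by rw [hlen1])
        intro k hk1 hk2
        have hpk := hpt1 k
        simp only [List.dropLast_singleton, List.not_mem_nil, if_false] at hpk
        rw [List.getD_eq_getElem?_getD, List.getD_eq_getElem?_getD,
          List.getElem?_eq_getElem hk1, List.getElem?_eq_getElem hk2] at hpk
        simpa using hpk
      refine ⟨p.set j ((j : Nat) : Int), ?_, by simp, ?_⟩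
      · show pvFindA (p.length + 1) p x = _
        simp only [pvFindA, hget]
        rw [if_pos hpxne, hyj, hrec, hp1]
        rw [show rootC [j] = j from rfl]
        have hset : PySem.List.pySetD p x ((j : Nat) : Int) = p.set j ((j : Nat) : Int) := by
          rw [pySetD_norm p x _ h1 h2]
        simp only [hset]
        have hread : PySem.List.pyGetD (p.set j ((j : Nat) : Int)) x 0 = ((j : Nat) : Int) := by
          rw [pyGetD_norm _ x 0 (by simp; omega) (by simp; omega)]
          have : pvNorm (p.set j ((j : Nat) : Int)).length x = j := by
            rw [List.length_set]
          rw [this, getD_set, if_pos ⟨rfl, hjlt⟩]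
        rw [hread]
      · intro k
        simp only [List.dropLast_singleton, List.not_mem_nil, if_false]
        rw [getD_set]
        by_cases hk : k = j
        · rw [if_pos ⟨hk, hjlt⟩, hk, hyj]
        · rw [if_neg (by simp [hk])]
    | step =>
      rename_i l2 hs hc2 hn2
      have hyj : p.getD j 0 = ((stepN p j : Nat) : Int) := by unfold stepN; omega
      have hylt : stepN p j < p.length := by unfold stepN; omega
      rcases findA_spec_nonneg hG hylt hc2 p.length (by have := chain_len_le hG hc2 hylt; omega) with ⟨p1, hrec, hlen1, hpt1⟩
      have hl2 : l2 ≠ [] := chain_ne_nil hc2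
      have hrc : rootC (j :: l2) = rootC l2 := rootC_cons hl2
      refine ⟨p1.set j ((rootC l2 : Nat) : Int), ?_, by simp [hlen1], ?_⟩
      · show pvFindA (p.length + 1) p x = _
        simp only [pvFindA, hget]
        rw [if_pos hpxne, hyj, hrec]
        have hset : PySem.List.pySetD p1 x ((rootC l2 : Nat) : Int) = p1.set j ((rootC l2 : Nat) : Int) := by
          rw [pySetD_norm p1 x _ (by rw [hlen1]; exact h1) (by rw [hlen1]; exact h2), hlen1]
        simp only [hset]
        have hread : PySem.List.pyGetD (p1.set j ((rootC l2 : Nat) : Int)) x 0 = ((rootC l2 : Nat) : Int) := by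
          rw [pyGetD_norm _ x 0 (by simp [hlen1]; omega) (by simp [hlen1]; omega)]
          have hpn : pvNorm (p1.set j ((rootC l2 : Nat) : Int)).length x = j := by
            rw [List.length_set, hlen1]
          rw [hpn, getD_set, if_pos ⟨rfl, by omega⟩]
        rw [hread, hrc]
      · intro k
        have hdl : (j :: l2).dropLast = j :: l2.dropLast := by
          cases l2 with
          | nil => exact absurd rfl hl2
          | cons a t => rfl
        rw [hdl, hrc, getD_set]
        by_cases hk : k = j
        · simp [hk, hlen1, hjlt]
        · rw [if_neg (by simp [hk]), hpt1 k]
          simp [hk]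

-- a find call preserves the whole simulation state and returns B's stored label
lemma findA_run {p c : List Int} (hR : RelPC p c) (x : Int)
    (h1 : -(p.length : Int) ≤ x) (h2 : x < (p.length : Int)) :
    ∃ p' r, pvFindA (p.length + 1) p x = (p', ((r : Nat) : Int)) ∧ p'.length = p.length ∧
      RelPC p' c ∧ stepN p' r = r ∧ r < p.length ∧
      PySem.List.pyGetD c x 0 = ((r : Nat) : Int) ∧
      (∀ j' l', j' < p.length → ChainN p' j' l' → ∀ l'', ChainN p j' l'' → rootC l' = rootC l'') := by
  obtain ⟨hlen, hG, hW, hroot⟩ := hR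
  have hn : 0 < p.length := by omega
  have hjlt : pvNorm p.length x < p.length := pvNorm_lt _ _ h1 h2 hn
  rcases hW _ hjlt with ⟨l, hc⟩
  rcases findA_spec p x h1 h2 hG hc with ⟨p', heq, hlen', hpt⟩
  have hrlt : rootC l < p.length := rootC_lt hG hc hjlt
  have hrfix : stepN p (rootC l) = rootC l := chain_last_fix hc
  have hS : ∀ z ∈ l.dropLast, ∀ lz, ChainN p z lz → rootC lz = rootC l := by
    intro z hz lz hlz
    rcases chain_suffix_root hc z (List.dropLast_subset _ hz) with ⟨lz', hlz', hr'⟩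
    rw [chain_unique hlz hlz', hr']
  have hpaint := paint_chain hpt hS hrfix
  have hrfix' : stepN p' (rootC l) = rootC l := by
    unfold stepN; rw [hpt (rootC l)]
    split
    · simp
    · exact hrfix
  have hG' : GoodP p' := by
    intro k hk
    rw [hpt k]
    rw [hlen'] at hk ⊢
    split
    · exact ⟨Int.natCast_nonneg _, by exact_mod_cast hrlt⟩
    · exact hG k hk
  have hW' : WfP p' := by
    intro k hk
    rcases hW k (by omega) with ⟨lk, hlk⟩
    rcases hpaint _ _ hlk with ⟨lk', hlk', _⟩
    exact ⟨lk', hlk'⟩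
  have hback : ∀ j' l', j' < p.length → ChainN p' j' l' → ∀ l'', ChainN p j' l'' → rootC l' = rootC l'' := by
    intro j' l' hj' hl' l'' hl''
    rcases hpaint _ _ hl'' with ⟨lt, hlt, hrt, _⟩
    rw [chain_unique hl' hlt, hrt]
  refine ⟨p', rootC l, heq, hlen', ⟨by omega, hG', hW', ?_⟩, hrfix', hrlt, ?_, hback⟩
  · intro j' hj' l' hl'
    rcases hW j' (by omega) with ⟨l'', hl''⟩
    rw [hback j' l' (by omega) hl' l'' hl'']
    exact hroot j' (by omega) l'' hl''
  · have hcx : PySem.List.pyGetD c x 0 = c.getD (pvNorm c.length x) 0 :=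
      pyGetD_norm c x 0 (by rw [← hlen]; exact h1) (by rw [← hlen]; exact h2)
    rw [hcx, ← hlen, hroot _ hjlt l hc]

-- one pair: A's union and B's whole-array relabel stay related
lemma union_step {p c : List Int} (hR : RelPC p c) (a b : Int)
    (ha1 : -(p.length : Int) ≤ a) (ha2 : a < (p.length : Int))
    (hb1 : -(p.length : Int) ≤ b) (hb2 : b < (p.length : Int)) :
    RelPC (pvUnionA p a b)
      (let old := PySem.List.pyGetD c a 0
       let nw := PySem.List.pyGetD c b 0
       if old ≠ nw then c.map (fun v => if v = old then nw else v) else c) := by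
  have hlen := hR.1
  rcases findA_run hR a ha1 ha2 with
    ⟨p1, ra, heq1, hlen1, hR1, hrafix1, hralt, hca, _⟩
  rcases findA_run hR1 b (by rw [hlen1]; exact hb1) (by rw [hlen1]; exact hb2) with
    ⟨p2, rb, heq2, hlen2, hR2, hrbfix2, hrblt, hcb, hback2⟩
  obtain ⟨hlen2', hG2, hW2, hroot2⟩ := hR2
  have hun : pvUnionA p a b = if ((ra : Nat) : Int) ≠ ((rb : Nat) : Int)
      then PySem.List.pySetD p2 ((ra : Nat) : Int) ((rb : Nat) : Int) else p2 := by
    unfold pvUnionA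
    rw [heq1]
    simp only
    rw [heq2]
  by_cases hrr : ra = rb
  · subst hrr
    have hB : (let old := PySem.List.pyGetD c a 0
        let nw := PySem.List.pyGetD c b 0
        if old ≠ nw then c.map (fun v => if v = old then nw else v) else c) = c := by
      simp only [hca, hcb]
      simp
    rw [hun, if_neg (by simp), hB]
    exact ⟨by omega, hG2, hW2, hroot2⟩
  · have hrane : ((ra : Nat) : Int) ≠ ((rb : Nat) : Int) := by
      intro h; exact hrr (by exact_mod_cast h)
    have hB : (let old := PySem.List.pyGetD c a 0
        let nw := PySem.List.pyGetD c b 0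
        if old ≠ nw then c.map (fun v => if v = old then nw else v) else c)
        = c.map (fun v => if v = ((ra : Nat) : Int) then ((rb : Nat) : Int) else v) := by
      simp only [hca, hcb]
      rw [if_pos hrane]
    rw [hun, if_pos hrane, hB]
    -- ra is still a root of p2 (the second find preserves root values)
    have hrafix2 : stepN p2 ra = ra := by
      rcases hW2 ra (by omega) with ⟨lra, hlra⟩
      have hra1 : rootC lra = ra := by
        have := hback2 ra lra (by omega) hlra [ra] (ChainN.fix ra hrafix1)
        simpa [rootC] using this
      have := chain_last_fix hlra
      rwa [hra1] at this
    have hset : PySem.List.pySetD p2 ((ra : Nat) : Int) ((rb : Nat) : Int) = p2.set ra ((rb : Nat) : Int) := by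
      rw [pySetD_norm p2 _ _ (by omega) (by omega)]
      simp [pvNorm]
    rw [hset]
    have hralt2 : ra < p2.length := by omega
    have hlink := link_chain hralt2 hrafix2 hrbfix2 hrr
    refine ⟨by simp; omega, ?_, ?_, ?_⟩
    · intro k hk
      rw [List.length_set] at hk
      rw [getD_set]
      by_cases hkr : k = ra
      · rw [if_pos ⟨hkr, by omega⟩]
        constructor
        · exact Int.natCast_nonneg _
        · simp only [List.length_set]; omega
      · rw [if_neg (by simp [hkr])]
        have := hG2 k (by omega)
        simpa using this
    · intro k hk
      rw [List.length_set] at hk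
      rcases hW2 k (by omega) with ⟨lk, hlk⟩
      rcases hlink _ _ hlk with ⟨lk', hlk', _⟩
      exact ⟨lk', hlk'⟩
    · intro k hk l' hl'
      rw [List.length_set] at hk
      rcases hW2 k (by omega) with ⟨lk, hlk⟩
      rcases hlink _ _ hlk with ⟨lk', hlk', hrt', _⟩
      rw [chain_unique hl' hlk', hrt']
      have hckk : c.getD k 0 = ((rootC lk : Nat) : Int) := hroot2 k (by omega) lk hlk
      have hklt : k < c.length := by omega
      rw [List.getD_eq_getElem?_getD, List.getElem?_map, List.getElem?_eq_getElem hklt]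
      simp only [Option.map_some, Option.getD_some]
      rw [List.getD_eq_getElem?_getD, List.getElem?_eq_getElem hklt, Option.getD_some] at hckk
      rw [hckk]
      by_cases hrk : rootC lk = ra
      · rw [if_pos (by exact_mod_cast congrArg (fun z : Nat => (z : Int)) hrk), if_pos hrk]
      · rw [if_neg (fun h => hrk (by exact_mod_cast h)), if_neg hrk]

-- B's relabel loop never changes the array length
lemma relabel_len : ∀ (pairs : List (Int × Int)) (c : List Int),
    (pairs.foldl (fun c pr =>
      let old := PySem.List.pyGetD c pr.1 0
      let nw := PySem.List.pyGetD c pr.2 0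
      if old ≠ nw then c.map (fun v => if v = old then nw else v) else c) c).length = c.length := by
  intro pairs
  induction pairs with
  | nil => intro c; rfl
  | cons q rest ih =>
    intro c
    rw [List.foldl_cons, ih]
    simp only
    split <;> simp

-- the union loop over all pairs keeps A's parent and B's labels related
lemma fold_pairs {t : Int} : ∀ (pairs : List (Int × Int)) (p c : List Int),
    RelPC p c → ((p.length : Int) = t ∨ pairs = []) →
    (∀ pr ∈ pairs, -t ≤ pr.1 ∧ pr.1 < t ∧ -t ≤ pr.2 ∧ pr.2 < t) →
    RelPC (pairs.foldl (fun p pr => pvUnionA p pr.1 pr.2) p)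
      (pairs.foldl (fun c pr =>
        let old := PySem.List.pyGetD c pr.1 0
        let nw := PySem.List.pyGetD c pr.2 0
        if old ≠ nw then c.map (fun v => if v = old then nw else v) else c) c) := by
  intro pairs
  induction pairs with
  | nil => intro p c hR _ _; exact hR
  | cons pr rest ih =>
    intro p c hR hlen hpre
    have hbnd := hpre pr (by simp)
    have hlt : (p.length : Int) = t := by
      rcases hlen with h | h
      · exact h
      · simp at h
    have hstep := union_step hR pr.1 pr.2 (by omega) (by omega) (by omega) (by omega)
    simp only [List.foldl_cons]
    refine ih _ _ hstep ?_ (fun q hq => hpre q (by simp [hq]))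
    left
    have hl1 := hstep.1
    obtain ⟨hl0, _, _, _⟩ := hR
    have hmap : (if PySem.List.pyGetD c pr.1 0 ≠ PySem.List.pyGetD c pr.2 0
        then c.map (fun v => if v = PySem.List.pyGetD c pr.1 0 then PySem.List.pyGetD c pr.2 0 else v)
        else c).length = c.length := by
      split <;> simp
    simp only at hl1
    omega

-- the grouping loop: A's (find + dict) fold equals B's dict fold over the final labels
lemma group_fold {c : List Int} : ∀ (idxs : List Int) (p : List Int) (d : PySem.Dict Int (List Int)),
    RelPC p c → (∀ i ∈ idxs, 0 ≤ i ∧ i < (p.length : Int)) →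
    (idxs.foldl (fun (s : List Int × PySem.Dict Int (List Int)) i =>
        let f := pvFindA (s.1.length + 1) s.1 i
        let d1 := if s.2.contains f.2 then s.2 else s.2.insert f.2 []
        (f.1, d1.modify f.2 [] (· ++ [i]))) (p, d)).2
    = idxs.foldl (fun (d : PySem.Dict Int (List Int)) i =>
        (d.setdefault (PySem.List.pyGetD c i 0) []).modify (PySem.List.pyGetD c i 0) [] (· ++ [i])) d := by
  intro idxs
  induction idxs with
  | nil => intro p d _ _; rfl
  | cons i rest ih =>
    intro p d hR hmem
    have hbnd := hmem i (by simp)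
    rcases findA_run hR i (by omega) (by omega) with
      ⟨p', r, heq, hlen', hR', _, _, hci, _⟩
    simp only [List.foldl_cons]
    rw [heq, hci]
    have hd : (if d.contains ((r : Nat) : Int) then d else d.insert ((r : Nat) : Int) ([] : List Int))
        = d.setdefault ((r : Nat) : Int) [] := by
      simp only [PySem.Dict.setdefault, PySem.Dict.insert]
      split <;> simp_all
    rw [hd]
    exact ih p' _ hR' (fun q hq => by have := hmem q (by simp [hq]); omega)

lemma init_rel (t : Int) : RelPC (PySem.List.pyRange 0 t 1) (PySem.List.pyRange 0 t 1) := by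
  set p := PySem.List.pyRange 0 t 1 with hp
  have hget : ∀ j, j < p.length → p.getD j 0 = (j : Int) := by
    intro j hj
    have hj' : j < (PySem.List.pyRange 0 t 1).length := by rw [← hp]; exact hj
    have hg := PySem.List.getElem_pyRange_one (a := 0) (b := t) (k := j) hj'
    rw [List.getD_eq_getElem?_getD, List.getElem?_eq_getElem hj]
    simpa [hp] using hg
  have hfix : ∀ j, j < p.length → stepN p j = j := by
    intro j hj; unfold stepN; rw [hget j hj]; simp
  refine ⟨rfl, ?_, ?_, ?_⟩
  · intro j hj; rw [hget j hj]; constructor <;> omega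
  · intro j hj; exact ⟨[j], ChainN.fix j (hfix j hj)⟩
  · intro j hj l hl
    rw [chain_unique hl (ChainN.fix j (hfix j hj))]
    rw [show rootC [j] = j from rfl, hget j hj]

-- ===== VERDICT (by name: the statement is the Claim_ definition above) =====
theorem build_merge_groups_py_spec : Claim_equal_build_merge_groups_py := by
  intro pairs t _ hpre
  unfold Spec_build_merge_groups_py build_merge_groups_py build_merge_groups_py_alt
  simp only []
  have hR0 := init_rel t
  have hlen0 : ((PySem.List.pyRange 0 t 1).length : Int) = t ∨ pairs = [] := by
    by_cases hp : pairs = []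
    · right; exact hp
    · left
      rcases List.exists_mem_of_ne_nil pairs hp with ⟨q, hq⟩
      have := hpre q hq
      rw [PySem.List.length_pyRange_one]
      omega
  have hRf := fold_pairs pairs _ _ hR0 hlen0 hpre
  have hlenf := hRf.1
  have hclen := relabel_len pairs (PySem.List.pyRange 0 t 1)
  rw [group_fold (PySem.List.pyRange 0 t 1) _ PySem.Dict.empty hRf ?_]
  intro i hi
  rw [PySem.List.mem_pyRange_one] at hi
  have hlr : (PySem.List.pyRange 0 t 1).length = (t - 0).toNat := PySem.List.length_pyRange_one 0 t
  constructor
  · omega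
  · omega
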